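-- pv_equiv track=rewrite | github.com/tinygrad/tinygrad | extra/amdpci/am_smi.py | same_line
-- ===== SOURCE A (Python) =====
-- def same_line(strs:list[list[str]]) -> list[str]:
--   ret = []
--   max_width_in_block = max(len(line) for block in strs for line in block)
--   max_height = max(len(block) for block in strs)
--   for i in range(max_height):
--     line = []
--     for block in strs:
--       if i < len(block):
--         line.append(block[i].ljust(max_width_in_block))
--       else:
--         line.append(' ' * max_width_in_block)
--     ret.append(' '.join(line))
--   return ret
-- ===== SOURCE B (Python) =====
-- def same_line(strs:list[list[str]]) -> list[str]:
--   # column-major accumulation: grow each output row block by block, no transpose/join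
--   max_width_in_block = max(len(line) for block in strs for line in block)
--   max_height = max(len(block) for block in strs)
--   rows = [''] * max_height
--   sep = ''
--   for block in strs:
--     for i, line in enumerate(block):
--       rows[i] += sep + line.ljust(max_width_in_block)
--     for i in range(len(block), max_height):
--       rows[i] += sep + ' ' * max_width_in_block
--     sep = ' '
--   return rows
-- ===== Notes on version B (the rewrite author's own statement) =====
-- stated objective: alternative
-- what changed: B inverts the loop nesting: instead of building each output row by scanning all blocks (with join), it keeps an array of max_height partial row strings and grows every row in place while walking the blocks once, appending each block's column (ljust'ed lines, then blank filler rows) with an explicit separator accumulator.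
import Mathlib
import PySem

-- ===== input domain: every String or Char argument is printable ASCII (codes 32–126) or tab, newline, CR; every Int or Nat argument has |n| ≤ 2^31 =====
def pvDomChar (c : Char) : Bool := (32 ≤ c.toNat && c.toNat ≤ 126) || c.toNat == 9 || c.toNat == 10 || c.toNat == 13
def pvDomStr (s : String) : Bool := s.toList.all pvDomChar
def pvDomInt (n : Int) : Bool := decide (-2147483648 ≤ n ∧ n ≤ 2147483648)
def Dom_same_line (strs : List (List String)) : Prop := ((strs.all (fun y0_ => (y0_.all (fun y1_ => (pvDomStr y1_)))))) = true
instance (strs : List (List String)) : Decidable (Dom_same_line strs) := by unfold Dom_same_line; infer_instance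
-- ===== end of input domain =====

-- B inverts the loop nesting: it grows max_height partial row strings in place while walking the blocks once (with a separator accumulator), instead of A's per-row scan over all blocks assembled with join; objective: alternative decomposition.


-- ===== PORT A =====
-- shared helpers: both Pythons compute max_width_in_block / max_height by the same max() expressions
def pvMaxWidth (strs : List (List String)) : Nat :=
  strs.foldl (fun acc block => block.foldl (fun a line => Nat.max a line.toList.length) acc) 0

def pvMaxHeight (strs : List (List String)) : Nat :=
  strs.foldl (fun acc block => Nat.max acc block.length) 0

-- s.ljust(w): pad on the right with spaces (exact: code-point append)
def pvLjust (s : String) (w : Nat) : String :=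
  String.ofList (s.toList ++ List.replicate (w - s.toList.length) ' ')

-- ' ' * w
def pvSpaces (w : Nat) : String := String.ofList (List.replicate w ' ')

def same_line (strs : List (List String)) : List String :=
  let maxW := pvMaxWidth strs
  let maxH := pvMaxHeight strs
  (List.range maxH).foldl (fun ret i =>
    ret ++ [PySem.Str.join " " (strs.foldl (fun line block =>
      line ++ [if i < block.length then pvLjust (block.getD i "") maxW else pvSpaces maxW]) [])]) []

-- ===== PORT B =====
-- one Python loop iteration over `block`: rows[i] += sep + line.ljust(w) for i,line in enumerate(block),
-- then rows[i] += sep + ' '*w for i in range(len(block), h); returns (rows, ' ') as sep becomes ' '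
def pvStep (w h : Nat) (st : List String × String) (block : List String) : List String × String :=
  let rows1 := block.zipIdx.foldl
    (fun rs (p : String × Nat) => rs.set p.2 (rs.getD p.2 "" ++ st.2 ++ pvLjust p.1 w)) st.1
  let rows2 := (List.range' block.length (h - block.length)).foldl
    (fun rs i => rs.set i (rs.getD i "" ++ st.2 ++ pvSpaces w)) rows1
  (rows2, " ")

def same_line_alt (strs : List (List String)) : List String :=
  let maxW := pvMaxWidth strs
  let maxH := pvMaxHeight strs
  (strs.foldl (pvStep maxW maxH) (List.replicate maxH "", "")).1

-- ===== PRECONDITION & SPEC =====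
-- Pre_ excludes exactly the inputs with no line at all (strs empty or every block empty), on which Python's max() raises ValueError in both A and B.
def Pre_same_line (strs : List (List String)) : Prop := strs.flatMap (fun b => b) ≠ []
instance (strs : List (List String)) : Decidable (Pre_same_line strs) := by unfold Pre_same_line; infer_instance
def pvWitness_same_line : List (List String) := [["ab", "c"], ["xyz"]]

def Spec_same_line (strs : List (List String)) (out : List String) : Prop := out = same_line_alt strs
instance (strs : List (List String)) (out : List String) : Decidable (Spec_same_line strs out) := by unfold Spec_same_line; infer_instance

-- ===== CLAIM (what is proved, stated in full; the proofs are below) =====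
def Claim_equal_same_line : Prop := ∀ (strs : List (List String)), Dom_same_line strs → Pre_same_line strs → Spec_same_line strs (same_line strs)

-- ===== LEMMAS AND PROOFS =====

-- the cell block `block` contributes to output row i (proof-only abbreviation)
def pvCell (w i : Nat) (block : List String) : String :=
  if i < block.length then pvLjust (block.getD i "") w else pvSpaces w

lemma pvMaxHeight_bound (strs : List (List String)) (b : List String) (hb : b ∈ strs) :
    b.length ≤ pvMaxHeight strs :=
  (PySem.List.le_foldl_max_nat strs List.length 0).2 b hb

-- A's two appending loops are maps: A = the canonical row matrix
lemma same_line_canon (strs : List (List String)) :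
    same_line strs = (List.range (pvMaxHeight strs)).map
      (fun i => PySem.Str.join " " (strs.map (pvCell (pvMaxWidth strs) i))) := by
  unfold same_line
  simp only []
  rw [PySem.List.foldl_append_singleton_eq_map
    (fun i => PySem.Str.join " " (strs.foldl (fun line block =>
      line ++ [if i < block.length then pvLjust (block.getD i "") (pvMaxWidth strs) else pvSpaces (pvMaxWidth strs)]) []))]
  rw [List.nil_append]
  apply List.map_congr_left
  intro i _
  congr 1
  simpa [pvCell] using PySem.List.foldl_append_singleton_eq_map
    (fun block => pvCell (pvMaxWidth strs) i block) strs []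

-- pointwise effect of the enumerate loop (fold of set-updates over zipIdx)
lemma pvZipLoop (w : Nat) (sep : String) (block : List String) : ∀ (k : Nat) (rows : List String),
    k + block.length ≤ rows.length →
    ((block.zipIdx k).foldl
      (fun rs (p : String × Nat) => rs.set p.2 (rs.getD p.2 "" ++ sep ++ pvLjust p.1 w)) rows).length = rows.length ∧
    ∀ i : Nat, ((block.zipIdx k).foldl
      (fun rs (p : String × Nat) => rs.set p.2 (rs.getD p.2 "" ++ sep ++ pvLjust p.1 w)) rows).getD i "" =
      if k ≤ i ∧ i < k + block.length then rows.getD i "" ++ sep ++ pvLjust (block.getD (i - k) "") w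
      else rows.getD i "" := by
  induction block with
  | nil => intro k rows _; simp
  | cons b bs ih =>
    intro k rows hk
    rw [List.zipIdx_cons, List.foldl_cons]
    have hlen : (rows.set k (rows.getD k "" ++ sep ++ pvLjust b w)).length = rows.length :=
      List.length_set
    obtain ⟨ihlen, ihget⟩ := ih (k + 1) (rows.set k (rows.getD k "" ++ sep ++ pvLjust b w))
      (by simp only [List.length_cons] at hk; omega)
    refine ⟨by rw [ihlen, hlen], ?_⟩
    intro i
    rw [ihget i]
    have hkr : k < rows.length := by simp only [List.length_cons] at hk; omega
    by_cases hik : i = k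
    · subst hik
      rw [if_neg (by omega), if_pos (by simp only [List.length_cons]; omega)]
      simp [List.getD_eq_getElem?_getD, hkr]
    · have hset : (rows.set k (rows.getD k "" ++ sep ++ pvLjust b w)).getD i "" = rows.getD i "" := by
        simp [List.getD_eq_getElem?_getD, Ne.symm hik]
      rw [hset]
      by_cases hin : k + 1 ≤ i ∧ i < k + 1 + bs.length
      · rw [if_pos hin, if_pos (by simp only [List.length_cons]; omega)]
        have : i - k = (i - (k + 1)) + 1 := by omega
        rw [this]
        rfl
      · rw [if_neg hin, if_neg (by simp only [List.length_cons]; omega)]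

-- pointwise effect of the blank-filler loop (fold of set-updates over range')
lemma pvRangeLoop (sep g : String) (n : Nat) : ∀ (s : Nat) (rows : List String),
    s + n ≤ rows.length →
    ((List.range' s n).foldl (fun rs i => rs.set i (rs.getD i "" ++ sep ++ g)) rows).length = rows.length ∧
    ∀ i : Nat, ((List.range' s n).foldl (fun rs i => rs.set i (rs.getD i "" ++ sep ++ g)) rows).getD i "" =
      if s ≤ i ∧ i < s + n then rows.getD i "" ++ sep ++ g else rows.getD i "" := by
  induction n with
  | zero => intro s rows _; simp
  | succ n ih =>
    intro s rows hs
    rw [List.range'_succ, List.foldl_cons]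
    have hsr : s < rows.length := by omega
    obtain ⟨ihlen, ihget⟩ := ih (s + 1) (rows.set s (rows.getD s "" ++ sep ++ g)) (by simp; omega)
    refine ⟨by rw [ihlen, List.length_set], ?_⟩
    intro i
    rw [ihget i]
    by_cases his : i = s
    · subst his
      rw [if_neg (by omega), if_pos (by omega)]
      simp [List.getD_eq_getElem?_getD, hsr]
    · have hset : (rows.set s (rows.getD s "" ++ sep ++ g)).getD i "" = rows.getD i "" := by
        simp [List.getD_eq_getElem?_getD, Ne.symm his]
      rw [hset]
      by_cases hin : s + 1 ≤ i ∧ i < s + 1 + n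
      · rw [if_pos hin, if_pos (by omega)]
      · rw [if_neg hin, if_neg (by omega)]

-- one pvStep appends `sep ++ cell` to every row
lemma pvStep_effect (w h : Nat) (rows : List String) (sep : String) (b : List String)
    (hr : rows.length = h) (hb : b.length ≤ h) :
    (pvStep w h (rows, sep) b).1.length = h ∧
    ∀ i : Nat, i < h →
      (pvStep w h (rows, sep) b).1.getD i "" = rows.getD i "" ++ sep ++ pvCell w i b := by
  unfold pvStep
  simp only []
  obtain ⟨zlen, zget⟩ := pvZipLoop w sep b 0 rows (by omega)
  obtain ⟨rlen, rget⟩ := pvRangeLoop sep (pvSpaces w) (h - b.length) b.length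
    (b.zipIdx.foldl (fun rs (p : String × Nat) => rs.set p.2 (rs.getD p.2 "" ++ sep ++ pvLjust p.1 w)) rows)
    (by rw [zlen, hr]; omega)
  refine ⟨by rw [rlen, zlen, hr], ?_⟩
  intro i hi
  rw [rget i, zget i]
  unfold pvCell
  by_cases hib : i < b.length
  · rw [if_neg (by omega), if_pos (by omega), if_pos hib]
    simp
  · rw [if_pos (by omega), if_neg (by omega), if_neg hib]

-- folding the remaining blocks with sep = " " appends " " ++ cell per block to every row
lemma pvFold_rest (w h : Nat) (blocks : List (List String)) : ∀ (rows : List String),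
    rows.length = h → (∀ b ∈ blocks, b.length ≤ h) →
    ((blocks.foldl (pvStep w h) (rows, " ")).1.length = h ∧
    ∀ i : Nat, i < h → (blocks.foldl (pvStep w h) (rows, " ")).1.getD i "" =
      (blocks.map (pvCell w i)).foldl (fun a c => a ++ " " ++ c) (rows.getD i "")) := by
  induction blocks with
  | nil => intro rows hr _; exact ⟨hr, fun i _ => rfl⟩
  | cons b bs ih =>
    intro rows hr hb
    obtain ⟨slen, sget⟩ := pvStep_effect w h rows " " b hr (hb b (by simp))
    have hpair : pvStep w h (rows, " ") b = ((pvStep w h (rows, " ") b).1, " ") := rfl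
    rw [List.foldl_cons, hpair]
    obtain ⟨ihlen, ihget⟩ := ih (pvStep w h (rows, " ") b).1 slen (fun x hx => hb x (by simp [hx]))
    refine ⟨ihlen, ?_⟩
    intro i hi
    rw [ihget i hi, sget i hi, List.map_cons, List.foldl_cons]

-- pull a prefix out of the separator fold
lemma pvFoldl_pull (t : List String) : ∀ (x d : String),
    t.foldl (fun a c => a ++ " " ++ c) (x ++ d) = x ++ t.foldl (fun a c => a ++ " " ++ c) d := by
  induction t with
  | nil => intro x d; rfl
  | cons e t ih =>
    intro x d
    rw [List.foldl_cons, List.foldl_cons]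
    have : x ++ d ++ " " ++ e = x ++ (d ++ " " ++ e) := by
      simp [String.append_assoc]
    rw [this, ih]

lemma pvJoin_cons_cons (s t : String) (rest : List String) :
    PySem.Str.join " " (s :: t :: rest) = s ++ " " ++ PySem.Str.join " " (t :: rest) := by
  rw [← String.toList_inj]
  rw [PySem.Str.toList_join, List.map_cons, List.map_cons, PySem.Chars.join_cons_cons]
  simp [PySem.Str.toList_join]

-- ' '.join as the left fold B accumulates
lemma pvJoin_foldl (cs : List String) : ∀ (c : String),
    PySem.Str.join " " (c :: cs) = cs.foldl (fun a d => a ++ " " ++ d) c := by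
  induction cs with
  | nil =>
    intro c
    rw [PySem.Str.join, List.map_singleton, PySem.Chars.join_singleton]
    exact String.ofList_toList
  | cons d t ih =>
    intro c
    rw [pvJoin_cons_cons, ih d, List.foldl_cons, ← pvFoldl_pull t (c ++ " ") d]

-- ===== VERDICT (by name: the statement is the Claim_ definition above) =====
theorem same_line_spec : Claim_equal_same_line := by
  intro strs _ hpre
  unfold Spec_same_line
  have hne : strs ≠ [] := by
    intro h; rw [h] at hpre; exact hpre rfl
  obtain ⟨b0, rest, rfl⟩ : ∃ b0 rest, strs = b0 :: rest := by
    cases strs with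
    | nil => exact absurd rfl hne
    | cons a l => exact ⟨a, l, rfl⟩
  set w := pvMaxWidth (b0 :: rest) with hw
  set h := pvMaxHeight (b0 :: rest) with hh
  rw [same_line_canon]
  show (List.range h).map (fun i => PySem.Str.join " " ((b0 :: rest).map (pvCell w i)))
      = same_line_alt (b0 :: rest)
  unfold same_line_alt
  rw [← hw, ← hh]
  simp only []
  rw [List.foldl_cons]
  -- first step with sep = ""
  obtain ⟨slen, sget⟩ := pvStep_effect w h (List.replicate h "") "" b0
    (List.length_replicate) (pvMaxHeight_bound _ b0 (by simp))
  have hpair : pvStep w h (List.replicate h "", "") b0 = ((pvStep w h (List.replicate h "", "") b0).1, " ") := rfl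
  rw [hpair]
  obtain ⟨flen, fget⟩ := pvFold_rest w h rest (pvStep w h (List.replicate h "", "") b0).1 slen
    (fun b hb => pvMaxHeight_bound _ b (by simp [hb]))
  apply List.ext_getElem (by simp [flen])
  intro i hi1 hi2
  have hih : i < h := by simpa using hi1
  have hget : (rest.foldl (pvStep w h) ((pvStep w h (List.replicate h "", "") b0).1, " ")).1[i] =
      (rest.foldl (pvStep w h) ((pvStep w h (List.replicate h "", "") b0).1, " ")).1.getD i "" := by
    simp [List.getD_eq_getElem?_getD, List.getElem?_eq_getElem hi2]
  rw [hget, fget i hih, sget i hih]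
  have hrepl : (List.replicate h "").getD i "" = "" := by
    rw [List.getD_eq_getElem?_getD, List.getElem?_replicate, if_pos hih]; rfl
  rw [hrepl]
  have hbase : ("" : String) ++ "" ++ pvCell w i b0 = pvCell w i b0 := by
    rw [String.append_empty, String.empty_append]
  rw [hbase, List.getElem_map, List.getElem_range, List.map_cons, pvJoin_foldl]
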